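-- pv_equiv track=rewrite | github.com/rdyjun/coding-test | 프로그래머스/lv1/42840. 모의고사/모의고사.py | solution
-- ===== SOURCE A (Python) =====
-- def solution(answers):
--     l = len(answers)
--     t = [3, 3, 1, 1, 2, 2, 4, 4, 5, 5]
--     t2 = [1, 3, 4, 5]
--     arr1 = [i % 5 + 1 for i in range(l)]
--     arr2 = [2 if i % 2 == 0 else t2[i // 2 % 4] for i in range(l)]
--     arr3 = [t[i % 10] for i in range(l)]
--
--     ans = [0, 0, 0]
--     for idx, val in enumerate(answers):
--         if arr1[idx] == val:
--             ans[0] += 1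
--         if arr2[idx] == val:
--             ans[1] += 1
--         if arr3[idx] == val:
--             ans[2] += 1
--
--     n = max(ans)
--     aarr = set()
--     for i in range(3):
--         if ans[i] == n:
--             aarr.add(i + 1)
--     return list(aarr)
-- ===== SOURCE B (Python) =====
-- def solution(answers):
--     hist = {}
--     for i, a in enumerate(answers):
--         k = (i % 40, a)
--         hist[k] = hist.get(k, 0) + 1
--     patterns = [[1, 2, 3, 4, 5], [2, 1, 2, 3, 2, 4, 2, 5], [3, 3, 1, 1, 2, 2, 4, 4, 5, 5]]
--     scores = [sum(hist.get((r, p[r % len(p)]), 0) for r in range(40)) for p in patterns]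
--     best = max(scores)
--     return [k + 1 for k, s in enumerate(scores) if s == best]
-- ===== Notes on version B (the rewrite author's own statement) =====
-- stated objective: alternative
-- what changed: B replaces A's three per-element pattern comparisons with a hash index: one pass builds a histogram keyed by (index mod 40, answer), and each supervisor's score is then read off with 40 dictionary lookups against their repeating pattern (40 = lcm of the three pattern lengths), so no pattern is ever compared element-by-element with the answer list.
import Mathlib
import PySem

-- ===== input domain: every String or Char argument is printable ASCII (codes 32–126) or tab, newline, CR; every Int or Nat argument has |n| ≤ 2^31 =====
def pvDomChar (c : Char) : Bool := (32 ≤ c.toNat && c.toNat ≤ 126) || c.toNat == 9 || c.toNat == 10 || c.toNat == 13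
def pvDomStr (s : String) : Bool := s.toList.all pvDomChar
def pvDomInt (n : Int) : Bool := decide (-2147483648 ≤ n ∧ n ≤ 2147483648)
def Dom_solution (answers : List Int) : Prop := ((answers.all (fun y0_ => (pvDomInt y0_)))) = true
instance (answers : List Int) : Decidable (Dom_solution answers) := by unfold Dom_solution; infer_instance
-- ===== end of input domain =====

-- B replaces A's three per-element pattern comparisons with a (index mod 40, answer) histogram
-- built in one pass and 40 dictionary lookups per supervisor (alternative algorithm, same cost).


-- ===== PORT A =====
def solution (answers : List Int) : List Int :=
  let l : Int := (answers.length : Int)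
  let t : List Int := [3, 3, 1, 1, 2, 2, 4, 4, 5, 5]
  let t2 : List Int := [1, 3, 4, 5]
  let arr1 : List Int := (PySem.List.pyRange 0 l 1).map (fun i => PySem.Int.mod i 5 + 1)
  -- the pyGetD defaults below are never used: every index is in range in the Python too
  let arr2 : List Int := (PySem.List.pyRange 0 l 1).map (fun i =>
    if PySem.Int.mod i 2 = 0 then 2
    else PySem.List.pyGetD t2 (PySem.Int.mod (PySem.Int.floordiv i 2) 4) 0)
  let arr3 : List Int := (PySem.List.pyRange 0 l 1).map (fun i => PySem.List.pyGetD t (PySem.Int.mod i 10) 0)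
  let ans : Int × Int × Int := (PySem.List.enumerate answers 0).foldl (fun ans iv =>
      ((if PySem.List.pyGetD arr1 iv.1 0 = iv.2 then ans.1 + 1 else ans.1),
       (if PySem.List.pyGetD arr2 iv.1 0 = iv.2 then ans.2.1 + 1 else ans.2.1),
       (if PySem.List.pyGetD arr3 iv.1 0 = iv.2 then ans.2.2 + 1 else ans.2.2)))
    ((0 : Int), (0 : Int), (0 : Int))
  let n : Int := max ans.1 (max ans.2.1 ans.2.2)
  let ansL : List Int := [ans.1, ans.2.1, ans.2.2]
  -- list(aarr): the set's elements are inserted in ascending order 1,2,3, which is also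
  -- CPython's iteration order for a subset of {1,2,3}, so insertion order is exact here
  (PySem.List.pyRange 0 3 1).foldl
    (fun (s : PySem.Set Int) i => if PySem.List.pyGetD ansL i 0 = n then PySem.Set.add s (i + 1) else s)
    PySem.Set.empty

-- ===== PORT B =====
def solution_alt (answers : List Int) : List Int :=
  let hist : PySem.Dict (Int × Int) Int :=
    (PySem.List.enumerate answers 0).foldl
      (fun d ia => d.modify (PySem.Int.mod ia.1 40, ia.2) 0 (· + 1)) PySem.Dict.empty
  let patterns : List (List Int) := [[1,2,3,4,5], [2,1,2,3,2,4,2,5], [3,3,1,1,2,2,4,4,5,5]]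
  let scores : List Int := patterns.map (fun p =>
    ((PySem.List.pyRange 0 40 1).map
      (fun r => hist.getD (r, PySem.List.pyGetD p (PySem.Int.mod r (p.length : Int)) 0) 0)).sum)
  let best : Int := (PySem.List.max? scores (fun x => x)).getD 0   -- scores has 3 elements, never none
  (PySem.List.enumerate scores 0).foldl (fun acc ks => if ks.2 = best then acc ++ [ks.1 + 1] else acc) []

-- ===== PRECONDITION & SPEC =====
def Spec_solution (answers : List Int) (out : List Int) : Prop := out = solution_alt answers
instance (answers : List Int) (out : List Int) : Decidable (Spec_solution answers out) := by unfold Spec_solution; infer_instance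

-- ===== CLAIM (what is proved, stated in full; the proofs are below) =====
def Claim_equal_solution : Prop := ∀ (answers : List Int), Dom_solution answers → Spec_solution answers (solution answers)


-- ===== LEMMAS AND PROOFS =====

-- the final stage of both programs, as a function of the three counters
theorem pv_tail (a b c : Int) :
    (PySem.List.pyRange 0 3 1).foldl
      (fun (s : PySem.Set Int) i => if PySem.List.pyGetD [a, b, c] i 0 = max a (max b c) then PySem.Set.add s (i + 1) else s)
      PySem.Set.empty
    = (PySem.List.enumerate [a, b, c] 0).foldl
        (fun acc ks => if ks.2 = (PySem.List.max? [a, b, c] (fun x => x)).getD 0 then acc ++ [ks.1 + 1] else acc) [] := by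
  have hr : PySem.List.pyRange 0 3 1 = [0, 1, 2] := by decide
  rw [hr, PySem.List.max?_id_cons]
  have g0 : PySem.List.pyGetD [a, b, c] 0 0 = a := rfl
  have g1 : PySem.List.pyGetD [a, b, c] 1 0 = b := rfl
  have g2 : PySem.List.pyGetD [a, b, c] 2 0 = c := rfl
  have hm : ([b, c].foldl max a) = max a (max b c) := by
    simp only [List.foldl_cons, List.foldl_nil]; rw [max_assoc]
  simp only [PySem.List.enumerate_cons, PySem.List.enumerate_nil, Option.getD_some,
    List.foldl_cons, List.foldl_nil, g0, g1, g2, hm]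
  split_ifs <;> rfl

-- A's loop with three independent counters is three counts
theorem pv_split (answers : List Int) (c1 c2 c3 : (Int × Int) → Prop)
    [DecidablePred c1] [DecidablePred c2] [DecidablePred c3] :
    (PySem.List.enumerate answers 0).foldl (fun ans iv =>
        ((if c1 iv then ans.1 + 1 else ans.1),
         (if c2 iv then ans.2.1 + 1 else ans.2.1),
         (if c3 iv then ans.2.2 + 1 else ans.2.2)))
      ((0 : Int), (0 : Int), (0 : Int))
    = (((PySem.List.enumerate answers 0).countP (fun iv => decide (c1 iv)) : Int),
       ((PySem.List.enumerate answers 0).countP (fun iv => decide (c2 iv)) : Int),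
       ((PySem.List.enumerate answers 0).countP (fun iv => decide (c3 iv)) : Int)) := by
  rw [PySem.List.foldl_prod_mk
    (f := fun acc iv => if c1 iv then acc + 1 else acc)
    (g := fun s iv => ((if c2 iv then s.1 + 1 else s.1), (if c3 iv then s.2 + 1 else s.2)))]
  rw [PySem.List.foldl_prod_mk
    (f := fun acc iv => if c2 iv then acc + 1 else acc)
    (g := fun acc iv => if c3 iv then acc + 1 else acc)]
  rw [PySem.List.foldl_ite_add_one, PySem.List.foldl_ite_add_one, PySem.List.foldl_ite_add_one]
  simp

-- one pair contributes to exactly one residue slot of the 40-wide scan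
theorem pv_single (g : Int → Int) (x : Int × Int) (h0 : 0 ≤ x.1) (h40 : x.1 < 40) :
    ((PySem.List.pyRange 0 40 1).map (fun r => if x == (r, g r) then (1 : Int) else 0)).sum
      = if x.2 == g x.1 then (1 : Int) else 0 := by
  rw [PySem.List.sum_map_ite_one_zero]
  rw [PySem.List.pyRange_one_append 0 x.1 40 h0 (le_of_lt h40),
    PySem.List.pyRange_one_cons h40, List.countP_append, List.countP_cons]
  have hleft : (PySem.List.pyRange 0 x.1 1).countP (fun r => x == (r, g r)) = 0 := by
    rw [List.countP_eq_zero]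
    intro r hr
    have : r < x.1 := ((PySem.List.mem_pyRange_one).1 hr).2
    simp only [beq_iff_eq, Prod.ext_iff]
    intro ⟨h1, _⟩; omega
  have hright : (PySem.List.pyRange (x.1 + 1) 40 1).countP (fun r => x == (r, g r)) = 0 := by
    rw [List.countP_eq_zero]
    intro r hr
    have : x.1 + 1 ≤ r := ((PySem.List.mem_pyRange_one).1 hr).1
    simp only [beq_iff_eq, Prod.ext_iff]
    intro ⟨h1, _⟩; omega
  have hself : (x == (x.1, g x.1)) = (x.2 == g x.1) := by
    simp [Prod.ext_iff]
  rw [hleft, hright, hself]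
  split_ifs <;> simp

-- summing the histogram over the 40 residues is one count over the keyed pairs
theorem pv_count_sum (g : Int → Int) (ks : List (Int × Int))
    (h : ∀ x ∈ ks, 0 ≤ x.1 ∧ x.1 < 40) :
    ((PySem.List.pyRange 0 40 1).map (fun r => (ks.count (r, g r) : Int))).sum
      = (ks.countP (fun x => x.2 == g x.1) : Int) := by
  induction ks with
  | nil => simp
  | cons x t ih =>
    have hx := h x (by simp)
    have ht : ∀ y ∈ t, 0 ≤ y.1 ∧ y.1 < 40 := fun y hy => h y (by simp [hy])
    have hc : (fun r => ((x :: t).count (r, g r) : Int))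
        = fun r => (if x == (r, g r) then (1 : Int) else 0) + (t.count (r, g r) : Int) := by
      funext r
      rw [List.count_cons]
      split_ifs <;> push_cast <;> ring
    rw [hc, PySem.List.sum_map_add_int, pv_single g x hx.1 hx.2, ih ht, List.countP_cons]
    split_ifs <;> push_cast <;> ring

-- B's 40-lookup scan against a histogram is a plain count over the enumerated answers
theorem pv_score_count (answers : List Int) (g : Int → Int) :
    ((PySem.List.pyRange 0 40 1).map (fun r =>
        (((PySem.List.enumerate answers 0).foldl
            (fun d ia => d.modify (PySem.Int.mod ia.1 40, ia.2) 0 (· + 1)) PySem.Dict.empty).getD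
          (r, g r) 0))).sum
    = ((PySem.List.enumerate answers 0).countP
        (fun ia => ia.2 == g (PySem.Int.mod ia.1 40)) : Int) := by
  have hks : ∀ key, ((PySem.List.enumerate answers 0).foldl
      (fun d ia => d.modify (PySem.Int.mod ia.1 40, ia.2) 0 (· + 1)) PySem.Dict.empty).getD key 0
      = ((((PySem.List.enumerate answers 0).map
            (fun ia => (PySem.Int.mod ia.1 40, ia.2))).count key : Int)) := by
    intro key
    rw [← List.foldl_map (f := fun ia : Int × Int => (PySem.Int.mod ia.1 40, ia.2))
      (g := fun d x => PySem.Dict.modify d x 0 (· + 1))]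
    rw [PySem.Dict.getD_foldl_modify_add_one]
    simp [PySem.Dict.getD, PySem.Dict.get?, PySem.Dict.empty]
  simp only [hks]
  rw [pv_count_sum]
  · rw [List.countP_map]
    rfl
  · intro x hx
    obtain ⟨ia, _, rfl⟩ := List.mem_map.1 hx
    exact ⟨PySem.Int.mod_nonneg _ (by norm_num), PySem.Int.mod_lt _ (by norm_num)⟩

-- pattern 1: A's arr1 count is B's pattern-1 count
theorem pv_cond1 (answers : List Int) :
    (PySem.List.enumerate answers 0).countP
      (fun iv => decide (PySem.List.pyGetD ((PySem.List.pyRange 0 (answers.length : Int) 1).map (fun i => PySem.Int.mod i 5 + 1)) iv.1 0 = iv.2))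
    = (PySem.List.enumerate answers 0).countP
      (fun ia => ia.2 == PySem.List.pyGetD [1, 2, 3, 4, 5]
        (PySem.Int.mod (PySem.Int.mod ia.1 40) (([1, 2, 3, 4, 5] : List Int).length : Int)) 0) := by
  apply List.countP_congr
  intro iv hiv
  obtain ⟨k, hk, rfl⟩ := (PySem.List.mem_enumerate_iff _ _ _).1 hiv
  have hl : (([1, 2, 3, 4, 5] : List Int).length) = 5 := rfl
  have hm40 : PySem.Int.mod ((k : Nat) : Int) 40 = ((k % 40 : Nat) : Int) := by
    exact_mod_cast PySem.Int.mod_natCast k 40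
  have hm : PySem.Int.mod ((k : Nat) : Int) 5 = ((k % 5 : Nat) : Int) := by
    exact_mod_cast PySem.Int.mod_natCast k 5
  have hm' : PySem.Int.mod (((k % 40 : Nat) : Nat) : Int) 5 = ((k % 40 % 5 : Nat) : Int) := by
    exact_mod_cast PySem.Int.mod_natCast (k % 40) 5
  have e : k % 40 % 5 = k % 5 := by omega
  have h5 : ∀ r : Nat, r < 5 → ((r : Int) + 1) = List.getD ([1, 2, 3, 4, 5] : List Int) r 0 := by decide
  simp only [zero_add, hl, Nat.cast_ofNat]
  rw [PySem.List.pyGetD_map_pyRange _ _ _ _ hk]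
  rw [hm, hm40, hm', e, PySem.List.pyGetD_natCast]
  rw [h5 (k % 5) (Nat.mod_lt _ (by norm_num))]
  simp only [decide_eq_true_eq, beq_iff_eq]
  exact eq_comm

-- pattern 2: A's arr2 count is B's pattern-2 count
theorem pv_cond2 (answers : List Int) :
    (PySem.List.enumerate answers 0).countP
      (fun iv => decide (PySem.List.pyGetD ((PySem.List.pyRange 0 (answers.length : Int) 1).map (fun i =>
          if PySem.Int.mod i 2 = 0 then 2
          else PySem.List.pyGetD [1, 3, 4, 5] (PySem.Int.mod (PySem.Int.floordiv i 2) 4) 0)) iv.1 0 = iv.2))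
    = (PySem.List.enumerate answers 0).countP
      (fun ia => ia.2 == PySem.List.pyGetD [2, 1, 2, 3, 2, 4, 2, 5]
        (PySem.Int.mod (PySem.Int.mod ia.1 40) (([2, 1, 2, 3, 2, 4, 2, 5] : List Int).length : Int)) 0) := by
  apply List.countP_congr
  intro iv hiv
  obtain ⟨k, hk, rfl⟩ := (PySem.List.mem_enumerate_iff _ _ _).1 hiv
  have hl : (([2, 1, 2, 3, 2, 4, 2, 5] : List Int).length) = 8 := rfl
  have hm40 : PySem.Int.mod ((k : Nat) : Int) 40 = ((k % 40 : Nat) : Int) := by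
    exact_mod_cast PySem.Int.mod_natCast k 40
  have hm2 : PySem.Int.mod ((k : Nat) : Int) 2 = ((k % 2 : Nat) : Int) := by
    exact_mod_cast PySem.Int.mod_natCast k 2
  have hd2 : PySem.Int.floordiv ((k : Nat) : Int) 2 = ((k / 2 : Nat) : Int) := by
    exact_mod_cast PySem.Int.floordiv_natCast k 2
  have hm4 : PySem.Int.mod ((k / 2 : Nat) : Int) 4 = ((k / 2 % 4 : Nat) : Int) := by
    exact_mod_cast PySem.Int.mod_natCast (k / 2) 4
  have hm8 : PySem.Int.mod (((k % 40 : Nat) : Nat) : Int) 8 = ((k % 40 % 8 : Nat) : Int) := by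
    exact_mod_cast PySem.Int.mod_natCast (k % 40) 8
  have e2 : k % 2 = (k % 40 % 8) % 2 := by omega
  have ed : k / 2 % 4 = (k % 40 % 8) / 2 % 4 := by omega
  have h8 : ∀ r : Nat, r < 8 →
      (if ((r % 2 : Nat) : Int) = 0 then (2 : Int)
       else PySem.List.pyGetD [1, 3, 4, 5] (((r / 2 % 4 : Nat) : Int)) 0)
      = List.getD ([2, 1, 2, 3, 2, 4, 2, 5] : List Int) r 0 := by decide
  simp only [zero_add, hl, Nat.cast_ofNat]
  rw [PySem.List.pyGetD_map_pyRange _ _ _ _ hk]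
  rw [hm2, hd2, hm4, hm40, hm8, e2, ed]
  rw [h8 (k % 40 % 8) (Nat.mod_lt _ (by norm_num))]
  rw [PySem.List.pyGetD_natCast]
  simp only [decide_eq_true_eq, beq_iff_eq]
  exact eq_comm

-- pattern 3: A's arr3 count is B's pattern-3 count
theorem pv_cond3 (answers : List Int) :
    (PySem.List.enumerate answers 0).countP
      (fun iv => decide (PySem.List.pyGetD ((PySem.List.pyRange 0 (answers.length : Int) 1).map (fun i =>
          PySem.List.pyGetD [3, 3, 1, 1, 2, 2, 4, 4, 5, 5] (PySem.Int.mod i 10) 0)) iv.1 0 = iv.2))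
    = (PySem.List.enumerate answers 0).countP
      (fun ia => ia.2 == PySem.List.pyGetD [3, 3, 1, 1, 2, 2, 4, 4, 5, 5]
        (PySem.Int.mod (PySem.Int.mod ia.1 40) (([3, 3, 1, 1, 2, 2, 4, 4, 5, 5] : List Int).length : Int)) 0) := by
  apply List.countP_congr
  intro iv hiv
  obtain ⟨k, hk, rfl⟩ := (PySem.List.mem_enumerate_iff _ _ _).1 hiv
  have hl : (([3, 3, 1, 1, 2, 2, 4, 4, 5, 5] : List Int).length) = 10 := rfl
  have hm40 : PySem.Int.mod ((k : Nat) : Int) 40 = ((k % 40 : Nat) : Int) := by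
    exact_mod_cast PySem.Int.mod_natCast k 40
  have hm : PySem.Int.mod ((k : Nat) : Int) 10 = ((k % 10 : Nat) : Int) := by
    exact_mod_cast PySem.Int.mod_natCast k 10
  have hm' : PySem.Int.mod (((k % 40 : Nat) : Nat) : Int) 10 = ((k % 40 % 10 : Nat) : Int) := by
    exact_mod_cast PySem.Int.mod_natCast (k % 40) 10
  have e : k % 40 % 10 = k % 10 := by omega
  simp only [zero_add, hl, Nat.cast_ofNat]
  rw [PySem.List.pyGetD_map_pyRange _ _ _ _ hk]
  rw [hm, hm40, hm', e]
  simp only [decide_eq_true_eq, beq_iff_eq]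
  exact eq_comm

-- ===== VERDICT (by name: the statement is the Claim_ definition above) =====
theorem solution_spec : Claim_equal_solution := by
  intro answers _
  unfold Spec_solution solution solution_alt
  simp only []
  rw [pv_split]
  simp only [List.map_cons, List.map_nil]
  simp only [pv_score_count answers (fun r => PySem.List.pyGetD [1,2,3,4,5] (PySem.Int.mod r (([1,2,3,4,5] : List Int).length : Int)) 0),
    pv_score_count answers (fun r => PySem.List.pyGetD [2,1,2,3,2,4,2,5] (PySem.Int.mod r (([2,1,2,3,2,4,2,5] : List Int).length : Int)) 0),
    pv_score_count answers (fun r => PySem.List.pyGetD [3,3,1,1,2,2,4,4,5,5] (PySem.Int.mod r (([3,3,1,1,2,2,4,4,5,5] : List Int).length : Int)) 0)]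
  simp only [← pv_cond1 answers, ← pv_cond2 answers, ← pv_cond3 answers]
  exact pv_tail _ _ _
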